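-- pv_equiv track=rewrite | github.com/jgfranco/formation | 2024_01/matrixSpeedDrill6.py | solution
-- ===== SOURCE A (Python) =====
-- def solution(m):
--
--     maxIdx = -1
--     maxSum = 0
--     for row in range(len(m)):
--         rowSum  = sum(m[row])
--         if rowSum > maxSum:
--             maxSum = rowSum
--             maxIdx = row+1
--
--     return maxIdx
-- ===== SOURCE B (Python) =====
-- def solution(m):
--     # Build the row-sum table first, then pick the first maximum (only positive sums count).
--     sums = [sum(r) for r in m]
--     if not sums:
--         return -1
--     best = max(sums)
--     if best <= 0:
--         return -1
--     return sums.index(best) + 1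
-- ===== Notes on version B (the rewrite author's own statement) =====
-- stated objective: simpler
-- what changed: Replaces the fused max-tracking index loop by a build-the-row-sum-table-then-argmax decomposition: compute sums = [sum(r) for r in m], return -1 unless the maximum sum is positive, else sums.index(max)+1 (first occurrence matches A's strict-greater first-wins rule).
import Mathlib
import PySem

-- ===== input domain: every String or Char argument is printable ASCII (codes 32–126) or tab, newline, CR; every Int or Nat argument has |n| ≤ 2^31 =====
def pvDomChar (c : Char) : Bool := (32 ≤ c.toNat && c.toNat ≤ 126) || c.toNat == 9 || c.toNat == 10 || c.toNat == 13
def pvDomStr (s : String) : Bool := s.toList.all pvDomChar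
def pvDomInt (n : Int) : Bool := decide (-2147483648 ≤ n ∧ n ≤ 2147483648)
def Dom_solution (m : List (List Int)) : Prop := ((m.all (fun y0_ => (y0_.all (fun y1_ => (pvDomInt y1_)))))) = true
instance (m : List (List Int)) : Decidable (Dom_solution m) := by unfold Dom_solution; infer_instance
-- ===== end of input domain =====

-- One honest line: B builds the row-sum table first and takes the first positive argmax,
-- instead of A's fused max-tracking index loop; objective: simpler decomposition.


-- ===== PORT A =====
def solution (m : List (List Int)) : Int :=
  ((PySem.List.pyRange 0 (m.length : Int) 1).foldl
    (fun (st : Int × Int) row =>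
      let rowSum := (PySem.List.pyGetD m row ([] : List Int)).sum
      if rowSum > st.2 then (row + 1, rowSum) else st)
    (-1, 0)).1

-- ===== PORT B =====
def solution_alt (m : List (List Int)) : Int :=
  let sums := m.map List.sum
  if sums = [] then -1
  else
    let best := (PySem.List.max? sums (fun v => v)).getD 0
    if best ≤ 0 then -1
    else ((PySem.List.index? sums best).getD 0 : Int) + 1

-- ===== PRECONDITION & SPEC =====
def Spec_solution (m : List (List Int)) (out : Int) : Prop := out = solution_alt m
instance (m : List (List Int)) (out : Int) : Decidable (Spec_solution m out) := by unfold Spec_solution; infer_instance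

-- ===== CLAIM (what is proved, stated in full; the proofs are below) =====
def Claim_equal_solution : Prop := ∀ (m : List (List Int)), Dom_solution m → Spec_solution m (solution m)

-- ===== LEMMAS AND PROOFS =====

-- A's index loop over pre ++ xs, starting at index |pre|, is a fold over enumerate xs.
theorem foldl_pyRange_enum {α β : Type} (d : α) (g : β → Int → α → β) :
    ∀ (xs pre : List α) (st : β),
      (PySem.List.pyRange (pre.length : Int) ((pre.length : Int) + (xs.length : Int)) 1).foldl
        (fun st row => g st row (PySem.List.pyGetD (pre ++ xs) row d)) st
      = (PySem.List.enumerate xs (pre.length : Int)).foldl (fun st p => g st p.1 p.2) st := by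
  intro xs
  induction xs with
  | nil => intro pre st; simp [PySem.List.pyRange_one_eq_nil, PySem.List.enumerate]
  | cons x t ih =>
    intro pre st
    rw [PySem.List.pyRange_one_cons (by simp only [List.length_cons]; push_cast; omega)]
    simp only [List.foldl_cons, PySem.List.enumerate_cons]
    have hget : PySem.List.pyGetD (pre ++ x :: t) (pre.length : Int) d = x := by
      rw [PySem.List.pyGetD_natCast]
      simp [List.getD]
    rw [hget]
    have harr : (pre.length : Int) + 1 = ((pre ++ [x]).length : Int) := by simp
    have harr2 : (pre.length : Int) + ((x :: t).length : Int)
        = ((pre ++ [x]).length : Int) + (t.length : Int) := by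
      simp only [List.length_cons, List.length_append, List.length_nil]
      push_cast
      omega
    have hlist : pre ++ x :: t = (pre ++ [x]) ++ t := by simp
    rw [harr, harr2, hlist, ih (pre ++ [x])]

theorem enum_map {α β : Type} (f : α → β) :
    ∀ (l : List α) (s : Int),
      PySem.List.enumerate (l.map f) s
        = (PySem.List.enumerate l s).map (fun p => (p.1, f p.2)) := by
  intro l
  induction l with
  | nil => intro s; simp [PySem.List.enumerate]
  | cons x t ih => intro s; simp [PySem.List.enumerate_cons, ih]

-- first-extremal max? absorbs its head pairwise
theorem max?_cons_cons (x y : Int) (t : List Int) :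
    PySem.List.max? (x :: y :: t) (fun v => v)
      = PySem.List.max? ((if x < y then y else x) :: t) (fun v => v) := by
  by_cases h : x < y <;> simp [PySem.List.max?, List.foldl_cons, h]

theorem max?_cons (t : List Int) :
    ∀ (x : Int),
      PySem.List.max? (x :: t) (fun v => v)
        = some (match PySem.List.max? t (fun v => v) with
                | none => x
                | some b => if x < b then b else x) := by
  induction t with
  | nil => intro x; rfl
  | cons y t ih =>
    intro x
    rw [max?_cons_cons, ih, ih y]
    cases h : PySem.List.max? t (fun v => v) with
    | none => rfl
    | some b => simp only [Option.some.injEq]; split_ifs <;> omega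

-- characterisation of A's fused loop: max of (m0, sums) with first-wins strict >
theorem loop_char (sums : List Int) :
    ∀ (s i0 m0 : Int),
      (PySem.List.enumerate sums s).foldl
        (fun (st : Int × Int) p => if p.2 > st.2 then (p.1 + 1, p.2) else st) (i0, m0)
      = match PySem.List.max? sums (fun v => v) with
        | none => (i0, m0)
        | some b =>
            if m0 < b then (s + ((PySem.List.index? sums b).getD 0 : Int) + 1, b)
            else (i0, m0) := by
  induction sums with
  | nil => intro s i0 m0; simp [PySem.List.enumerate, PySem.List.max?]
  | cons x t ih =>
    intro s i0 m0
    rw [PySem.List.enumerate_cons, List.foldl_cons, max?_cons]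
    simp only []
    cases h : PySem.List.max? t (fun v => v) with
    | none =>
      have ht : t = [] := (PySem.List.max?_eq_none_iff t (fun v => v)).mp h
      subst ht
      simp only [PySem.List.enumerate, List.foldl_nil, PySem.List.index?_cons_self,
        Option.getD_some, Nat.cast_zero]
      by_cases hx : x > m0
      · rw [if_pos hx, if_pos (show m0 < x from hx)]
        simp only [Prod.mk.injEq]
        exact ⟨by ring, trivial⟩
      · rw [if_neg hx, if_neg (show ¬ m0 < x from hx)]
    | some b =>
      have hb : b ∈ t := PySem.List.max?_mem h
      obtain ⟨k, hk⟩ := Option.isSome_iff_exists.mp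
        ((PySem.List.index?_isSome_iff t b).mpr hb)
      by_cases hx : x > m0
      · rw [if_pos hx, ih (s + 1) (s + 1) x, h]
        simp only []
        by_cases hxb : x < b
        · have hne : x ≠ b := by omega
          simp only [if_pos hxb, if_pos (show m0 < b by omega)]
          rw [PySem.List.index?_cons_of_ne t hne, hk]
          simp only [Option.map_some, Option.getD_some, Prod.mk.injEq]
          exact ⟨by push_cast; ring, trivial⟩
        · simp only [if_neg hxb, if_pos (show m0 < x from hx), PySem.List.index?_cons_self,
            Option.getD_some, Nat.cast_zero, Prod.mk.injEq]
          exact ⟨by ring, trivial⟩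
      · rw [if_neg hx, ih (s + 1) i0 m0, h]
        simp only []
        by_cases hxb : x < b
        · simp only [if_pos hxb]
          by_cases hmb : m0 < b
          · have hne : x ≠ b := by omega
            simp only [if_pos hmb]
            rw [PySem.List.index?_cons_of_ne t hne, hk]
            simp only [Option.map_some, Option.getD_some, Prod.mk.injEq]
            exact ⟨by push_cast; ring, trivial⟩
          · simp [hmb]
        · simp only [if_neg hxb]
          rw [if_neg (show ¬ m0 < b by omega), if_neg (show ¬ m0 < x by omega)]

-- loop_char transported along row ↦ row.sum
theorem loop_char_rows (rows : List (List Int)) (s i0 m0 : Int) :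
    (PySem.List.enumerate rows s).foldl
      (fun (st : Int × Int) p => if p.2.sum > st.2 then (p.1 + 1, p.2.sum) else st) (i0, m0)
    = match PySem.List.max? (rows.map List.sum) (fun v => v) with
      | none => (i0, m0)
      | some b =>
          if m0 < b then
            (s + ((PySem.List.index? (rows.map List.sum) b).getD 0 : Int) + 1, b)
          else (i0, m0) := by
  have h := loop_char (rows.map List.sum) s i0 m0
  rw [enum_map List.sum rows s, List.foldl_map] at h
  simpa using h

theorem solution_as_enum (m : List (List Int)) :
    solution m
      = ((PySem.List.enumerate m 0).foldl
          (fun (st : Int × Int) p =>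
            if p.2.sum > st.2 then (p.1 + 1, p.2.sum) else st) (-1, 0)).1 := by
  unfold solution
  have h := foldl_pyRange_enum ([] : List Int)
      (fun (st : Int × Int) row a => if a.sum > st.2 then (row + 1, a.sum) else st)
      m [] ((-1 : Int), (0 : Int))
  simp only [List.length_nil, Nat.cast_zero, List.nil_append, zero_add] at h
  rw [h]

-- ===== VERDICT (by name: the statement is the Claim_ definition above) =====
theorem solution_spec : Claim_equal_solution := by
  intro m _
  unfold Spec_solution solution_alt
  rw [solution_as_enum, loop_char_rows m 0 (-1) 0]
  cases h : PySem.List.max? (m.map List.sum) (fun v => v) with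
  | none =>
    have : m.map List.sum = [] := (PySem.List.max?_eq_none_iff _ _).mp h
    simp [this]
  | some b =>
    have hb : b ∈ m.map List.sum := PySem.List.max?_mem h
    have hne : m.map List.sum ≠ [] := by intro h0; rw [h0] at hb; exact absurd hb (by simp)
    simp only [if_neg hne, h, Option.getD_some]
    by_cases hpos : (0 : Int) < b
    · rw [if_pos hpos, if_neg (by omega)]
      simp only []
      ring
    · rw [if_neg hpos, if_pos (by omega)]
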